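-- pv_equiv track=rewrite | github.com/skaven81/mycpu | bitmapfont/bdf2hex.py | hex_to_str
-- ===== SOURCE A (Python) =====
-- def hex_to_str(num):
--     s = ""
--     for i in range(0, 8):
--         if(num & (0x80 >> i)):
--             s += "X"
--         else:
--             s += "_"
--     return s
-- ===== SOURCE B (Python) =====
-- def hex_to_str(num):
--     return format(num & 0xFF, '08b').translate(str.maketrans('10', 'X_'))
-- ===== Notes on version B (the rewrite author's own statement) =====
-- stated objective: idiomatic
-- what changed: Replaces the per-bit loop with branches and string concatenation by a single format(num & 0xFF, '08b') call followed by a character translation '1'->'X', '0'->'_'.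
import Mathlib
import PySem

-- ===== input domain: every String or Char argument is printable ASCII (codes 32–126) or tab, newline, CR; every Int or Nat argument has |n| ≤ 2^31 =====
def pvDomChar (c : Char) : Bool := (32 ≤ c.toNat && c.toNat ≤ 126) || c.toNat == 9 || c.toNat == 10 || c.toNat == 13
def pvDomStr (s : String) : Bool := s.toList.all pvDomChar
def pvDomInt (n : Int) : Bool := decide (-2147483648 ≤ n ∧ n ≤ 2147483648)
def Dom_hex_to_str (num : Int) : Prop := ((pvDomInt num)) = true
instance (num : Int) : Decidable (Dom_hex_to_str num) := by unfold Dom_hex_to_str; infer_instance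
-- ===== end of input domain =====

-- B replaces A's per-bit loop by formatting the low byte as 8 binary digits and translating '1'->'X','0'->'_' (idiomatic, same cost).

-- ===== PORT A =====
-- for i in range(0, 8): s += "X" if num & (0x80 >> i) else "_"
def hex_to_str (num : Int) : String :=
  (PySem.List.pyRange 0 8 1).foldl
    (fun s i => s ++ (if PySem.Int.band num ((128 : Int) >>> i) ≠ 0 then "X" else "_")) ""

-- ===== PORT B =====
-- format(num & 0xFF, '08b') : binary digits of the low byte, zero-padded on the left to width 8
def pvFmt08b (m : Int) : List Char :=
  let bs := PySem.Int.toBinChars m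
  List.replicate (8 - bs.length) '0' ++ bs
-- .translate(str.maketrans('10', 'X_'))
def hex_to_str_alt (num : Int) : String :=
  String.ofList ((pvFmt08b (PySem.Int.band num 255)).map (fun c => if c = '1' then 'X' else '_'))

-- ===== PRECONDITION & SPEC =====
def Spec_hex_to_str (num : Int) (out : String) : Prop := out = hex_to_str_alt num
instance (num : Int) (out : String) : Decidable (Spec_hex_to_str num out) := by unfold Spec_hex_to_str; infer_instance

-- ===== CLAIM (what is proved, stated in full; the proofs are below) =====
def Claim_equal_hex_to_str : Prop := ∀ (num : Int), Dom_hex_to_str num → Spec_hex_to_str num (hex_to_str num)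

-- ===== LEMMAS AND PROOFS =====

-- x &&& m only reads the low 8 bits of x when m < 256
lemma pv_and_mod (x m : Nat) (hm : m < 256) : x &&& m = x % 256 &&& m := by
  apply Nat.eq_of_testBit_eq
  intro i
  rw [show (256 : Nat) = 2 ^ 8 from rfl]
  simp only [Nat.testBit_land, Nat.testBit_mod_two_pow]
  by_cases h : i < 8
  · simp [h]
  · have hmb : m.testBit i = false := by
      apply Nat.testBit_eq_false_of_lt
      calc m < 256 := hm
        _ = 2 ^ 8 := rfl
        _ ≤ 2 ^ i := Nat.pow_le_pow_right (by norm_num) (by omega)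
    simp [hmb]
  
-- subtracting a submask is bit-complement-and, on bytes (finite check)
set_option maxRecDepth 100000 in
-- subtracting a submask is bit-complement-and, checked for the nine masks A and B use
lemma pv_sub_and : ∀ v : Fin 256, ∀ m ∈ ([1,2,4,8,16,32,64,128,255] : List Nat),
    m - (m &&& (v : Nat)) = (255 - (v : Nat)) &&& m := by
  decide

-- Python's  a & m  depends only on  a % 256  when 0 ≤ m < 256
lemma pv_band_emod (a m : Int) (hmem : m ∈ ([1,2,4,8,16,32,64,128,255] : List Int)) :
    PySem.Int.band a m = PySem.Int.band (a % 256) m := by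
  have hm0 : 0 ≤ m := by fin_cases hmem <;> norm_num
  have hm : m < 256 := by fin_cases hmem <;> norm_num
  have hr0 : 0 ≤ a % 256 := Int.emod_nonneg a (by norm_num)
  unfold PySem.Int.band
  by_cases ha : 0 ≤ a
  · simp only [ha, hr0, hm0, if_pos]
    have h1 : (a % 256).toNat = a.toNat % 256 := by omega
    rw [h1, ← pv_and_mod a.toNat m.toNat (by omega)]
  · rw [if_neg ha, if_pos hm0, if_pos hr0, if_pos hm0]
    set y : Nat := (-a - 1).toNat with hy
    have h1 : (a % 256).toNat = 255 - y % 256 := by omega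
    have h2 : m.toNat &&& y = m.toNat &&& (y % 256) := by
      rw [Nat.land_comm, pv_and_mod y m.toNat (by omega), Nat.land_comm]
    have hmemN : m.toNat ∈ ([1,2,4,8,16,32,64,128,255] : List Nat) := by
      fin_cases hmem <;> decide
    have h3 := pv_sub_and ⟨y % 256, by omega⟩ m.toNat hmemN
    simp only at h3
    have goalnat : m.toNat - (m.toNat &&& y) = (a % 256).toNat &&& m.toNat := by
      rw [h2, h1]; exact h3
    exact_mod_cast congrArg (Nat.cast : Nat → Int) goalnat

-- A reads only the low byte
lemma pv_A_mod (num : Int) : hex_to_str num = hex_to_str (num % 256) := by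
  unfold hex_to_str
  simp only [show PySem.List.pyRange 0 8 1 = [0,1,2,3,4,5,6,7] from by decide, List.foldl_cons, List.foldl_nil]
  rw [show ((128:Int) >>> (0:Int)) = 128 from rfl, show ((128:Int) >>> (1:Int)) = 64 from rfl,
      show ((128:Int) >>> (2:Int)) = 32 from rfl, show ((128:Int) >>> (3:Int)) = 16 from rfl,
      show ((128:Int) >>> (4:Int)) = 8 from rfl, show ((128:Int) >>> (5:Int)) = 4 from rfl,
      show ((128:Int) >>> (6:Int)) = 2 from rfl, show ((128:Int) >>> (7:Int)) = 1 from rfl,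
      pv_band_emod num 128 (by decide), pv_band_emod num 64 (by decide),
      pv_band_emod num 32 (by decide), pv_band_emod num 16 (by decide),
      pv_band_emod num 8 (by decide), pv_band_emod num 4 (by decide),
      pv_band_emod num 2 (by decide), pv_band_emod num 1 (by decide)]

-- B reads only the low byte
lemma pv_B_mod (num : Int) : hex_to_str_alt num = hex_to_str_alt (num % 256) := by
  unfold hex_to_str_alt
  rw [pv_band_emod num 255 (by decide)]

-- on a single byte the two ports agree (finite check)
set_option maxRecDepth 100000 in
lemma pv_key : ∀ r : Fin 256, hex_to_str ((r : Nat) : Int) = hex_to_str_alt ((r : Nat) : Int) := by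
  decide

-- ===== VERDICT (by name: the statement is the Claim_ definition above) =====
theorem hex_to_str_spec : Claim_equal_hex_to_str := by
  intro num _
  unfold Spec_hex_to_str
  rw [pv_A_mod, pv_B_mod]
  have h0 : 0 ≤ num % 256 := Int.emod_nonneg num (by norm_num)
  have hlt : num % 256 < 256 := Int.emod_lt_of_pos num (by norm_num)
  have hc : num % 256 = (((num % 256).toNat : Nat) : Int) := by omega
  rw [hc]
  exact pv_key ⟨(num % 256).toNat, by omega⟩
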